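-- pv_equiv track=rewrite | github.com/yuangaonyc/euler_project | problem_26.py | super_check
-- ===== SOURCE A (Python) =====
-- def super_check(pattern, string):
-- 	i = 0
-- 	check = True
-- 	while check and i <= len(string)-len(pattern):
-- 		if string[i:i+len(pattern)] != pattern:
-- 			check = False
-- 		i += len(pattern)
-- 	return check
-- ===== SOURCE B (Python) =====
-- def super_check(pattern, string):
-- 	n = len(string) // len(pattern)
-- 	return string[:n * len(pattern)] == pattern * n
-- ===== Notes on version B (the rewrite author's own statement) =====
-- stated objective: simpler
-- what changed: Replaces the block-by-block while loop (with a mutable check flag) by a single slice comparison: the prefix of complete blocks is compared against pattern repeated n = len(string)//len(pattern) times.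
import Mathlib
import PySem

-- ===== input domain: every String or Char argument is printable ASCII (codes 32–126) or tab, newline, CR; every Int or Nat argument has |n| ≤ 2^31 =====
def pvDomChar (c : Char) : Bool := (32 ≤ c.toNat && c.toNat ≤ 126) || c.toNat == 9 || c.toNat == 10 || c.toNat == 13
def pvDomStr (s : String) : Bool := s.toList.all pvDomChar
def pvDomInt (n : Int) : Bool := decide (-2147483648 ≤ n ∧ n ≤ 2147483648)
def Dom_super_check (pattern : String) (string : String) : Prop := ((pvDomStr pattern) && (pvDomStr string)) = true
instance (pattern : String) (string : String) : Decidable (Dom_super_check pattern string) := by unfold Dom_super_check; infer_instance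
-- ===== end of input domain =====

-- B replaces A's block-by-block while loop by one bulk comparison of the complete-blocks
-- prefix against pattern * n (objective: simpler).

-- ===== PORT A =====
-- while loop of A: i steps by len(pattern); check flips to False on the first mismatching block.
-- The 'pat.length = 0' branch is a totality guard only: there Python A loops forever (outside Pre_).
def superLoopA (pat : List Char) (s : List Char) (i : Nat) (check : Bool) : Bool :=
  if hL : pat.length = 0 then check
  else if h : check = true ∧ (i : Int) ≤ (s.length : Int) - (pat.length : Int) then
    superLoopA pat s (i + pat.length)
      (if (s.drop i).take pat.length ≠ pat then false else check)
  else check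
termination_by s.length + pat.length - i
decreasing_by omega

def super_check (pattern : String) (string : String) : Bool :=
  superLoopA pattern.toList string.toList 0 true

-- ===== PORT B =====
-- Source B: n = len(string) // len(pattern); return string[:n*len(pattern)] == pattern * n
def super_check_alt (pattern : String) (string : String) : Bool :=
  let pat := pattern.toList
  let s := string.toList
  let n := s.length / pat.length
  decide (s.take (n * pat.length) = (List.replicate n pat).flatten)

-- ===== PRECONDITION & SPEC =====
-- Pre_ excludes only pattern = "": there Python A loops forever (never returns) and B raises ZeroDivisionError.
def Pre_super_check (pattern : String) (string : String) : Prop := pattern ≠ ""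
instance (pattern : String) (string : String) : Decidable (Pre_super_check pattern string) := by unfold Pre_super_check; infer_instance
def pvWitness_super_check : String × String := ("ab", "ababab")

def Spec_super_check (pattern : String) (string : String) (out : Bool) : Prop := out = super_check_alt pattern string
instance (pattern : String) (string : String) (out : Bool) : Decidable (Spec_super_check pattern string out) := by unfold Spec_super_check; infer_instance

-- ===== CLAIM (what is proved, stated in full; the proofs are below) =====
def Claim_equal_super_check : Prop := ∀ (pattern : String) (string : String), Dom_super_check pattern string → Pre_super_check pattern string → Spec_super_check pattern string (super_check pattern string)

-- ===== LEMMAS AND PROOFS =====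

-- common characterisation of "all complete aligned blocks equal pat"
def chk (pat : List Char) (t : List Char) : Bool :=
  if hL : pat.length = 0 then true
  else if t.length < pat.length then true
  else (decide (t.take pat.length = pat)) && chk pat (t.drop pat.length)
termination_by t.length
decreasing_by simp; omega

theorem superLoopA_false (pat s : List Char) (i : Nat) :
    superLoopA pat s i false = false := by
  rw [superLoopA]; split <;> simp

theorem superLoopA_eq_chk (pat s : List Char) (hL : pat.length ≠ 0) (i : Nat) :
    superLoopA pat s i true = chk pat (s.drop i) := by
  rw [superLoopA, chk]
  simp only [hL, dite_false, List.length_drop]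
  by_cases hc : (i : Int) ≤ (s.length : Int) - (pat.length : Int)
  · have hc' : ¬ (s.length - i < pat.length) := by omega
    simp only [true_and, hc, dite_true, hc', if_false]
    by_cases hne : (s.drop i).take pat.length = pat
    · simp only [hne, ne_eq, not_true_eq_false, if_false, decide_true, Bool.true_and]
      rw [superLoopA_eq_chk pat s hL (i + pat.length), List.drop_drop]
    · simp only [hne, ne_eq, not_false_eq_true, if_true, decide_false, Bool.false_and]
      exact superLoopA_false pat s (i + pat.length)
  · have hc' : s.length - i < pat.length := by omega
    simp [hc, hc']
termination_by s.length + pat.length - i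
decreasing_by omega

theorem chk_eq_block (pat s : List Char) (hL : pat.length ≠ 0) :
    chk pat s =
      decide (s.take ((s.length / pat.length) * pat.length)
        = (List.replicate (s.length / pat.length) pat).flatten) := by
  rw [chk]
  simp only [hL, dite_false]
  by_cases hlt : s.length < pat.length
  · have hn : s.length / pat.length = 0 := Nat.div_eq_of_lt hlt
    simp [hlt, hn]
  · have hle : pat.length ≤ s.length := by omega
    have hpos : 0 < pat.length := by omega
    have hn : s.length / pat.length = (s.length - pat.length) / pat.length + 1 :=
      Nat.div_eq_sub_div hpos hle
    set m := (s.length - pat.length) / pat.length with hm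
    have hrec := chk_eq_block pat (s.drop pat.length) hL
    have hdl : (s.drop pat.length).length = s.length - pat.length := by simp
    rw [hdl] at hrec
    have htk : (s.take pat.length).length = pat.length := by simp [hle]
    simp only [hlt, if_false, hrec, hn]
    have hsplit : s.take ((m + 1) * pat.length)
        = s.take pat.length ++ (s.drop pat.length).take (m * pat.length) := by
      rw [Nat.add_mul, one_mul, Nat.add_comm, List.take_add]
    have hrep : (List.replicate (m + 1) pat).flatten
        = pat ++ (List.replicate m pat).flatten := by
      simp [List.replicate_succ]
    rw [hsplit, hrep]
    have hiff : (s.take pat.length ++ (s.drop pat.length).take (m * pat.length)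
          = pat ++ (List.replicate m pat).flatten)
        ↔ (s.take pat.length = pat ∧
           (s.drop pat.length).take (m * pat.length) = (List.replicate m pat).flatten) := by
      constructor
      · intro h
        exact List.append_inj h (by simp [htk])
      · rintro ⟨h1, h2⟩; rw [h1, h2]
    simp only [hiff, ← hm, Bool.decide_and]
termination_by s.length
decreasing_by simp; omega

-- ===== VERDICT (by name: the statement is the Claim_ definition above) =====
theorem super_check_spec : Claim_equal_super_check := by
  intro pattern string _ hpre
  unfold Spec_super_check super_check super_check_alt
  have hL : pattern.toList.length ≠ 0 := by
    intro h
    exact hpre (by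
      have : pattern.toList = [] := List.eq_nil_of_length_eq_zero h
      exact String.ext (by simp [this]))
  rw [superLoopA_eq_chk pattern.toList string.toList hL 0, List.drop_zero,
    chk_eq_block pattern.toList string.toList hL]
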